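-- pv_equiv track=rewrite | github.com/thamin-i/advent-of-code-2025 | advent_of_code_2025/day_01/common.py | compute_password
-- ===== SOURCE A (Python) =====
-- import typing as t
--
-- def compute_password(
--     rotations: t.List[t.Tuple[int, int]],
--     only_count_pointed: bool,
--     pointed_number: int = 50,
-- ) -> int:
--     """Compute the password based on the rotations.
--
--     Args:
--         rotations (t.List[t.Tuple[int, int]]): List of rotations.
--         only_count_pointed (bool): Whether to only count pointed numbers.
--         pointed_number (int): Initial pointed number.
--
--
--     Returns:
--         int: The computed password.
--     """
--     password: int = 0
--     for rotation in rotations: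
--         if not only_count_pointed:
--             password += sum(
--                 1
--                 for i in range(1, rotation[1] + 1)
--                 if (pointed_number + rotation[0] * i) % 100 == 0
--             )
--         pointed_number = (pointed_number + rotation[0] * rotation[1]) % 100
--         if only_count_pointed and pointed_number == 0:
--             password += 1
--     return password
-- ===== SOURCE B (Python) =====
-- def compute_password(rotations, only_count_pointed, pointed_number=50):
--     password = 0
--     for rotation in rotations:
--         a, n = rotation[0], rotation[1]
--         if not only_count_pointed and n > 0:
--             # (pointed_number + a*i) % 100 is periodic in i with period 100, so it
--             # suffices to scan one 100-step block: n = 100*q + r gives q full blocks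
--             # plus the first r positions of a block.
--             q, r = divmod(n, 100)
--             if q:
--                 full = part = 0
--                 for i in range(1, 101):
--                     if (pointed_number + a * i) % 100 == 0:
--                         full += 1
--                         if i <= r:
--                             part += 1
--                 password += q * full + part
--             else:
--                 for i in range(1, r + 1):
--                     if (pointed_number + a * i) % 100 == 0:
--                         password += 1
--         pointed_number = (pointed_number + a * n) % 100
--         if only_count_pointed and pointed_number == 0:
--             password += 1
--     return password
-- ===== Notes on version B (the rewrite author's own statement) =====
-- stated objective: faster
-- what changed: Per rotation, instead of scanning all n click positions, B counts hits in one 100-step period (the predicate (p+a*i)%100==0 is periodic in i with period 100) and multiplies by n//100, adding the n%100 remainder block.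
import Mathlib
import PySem

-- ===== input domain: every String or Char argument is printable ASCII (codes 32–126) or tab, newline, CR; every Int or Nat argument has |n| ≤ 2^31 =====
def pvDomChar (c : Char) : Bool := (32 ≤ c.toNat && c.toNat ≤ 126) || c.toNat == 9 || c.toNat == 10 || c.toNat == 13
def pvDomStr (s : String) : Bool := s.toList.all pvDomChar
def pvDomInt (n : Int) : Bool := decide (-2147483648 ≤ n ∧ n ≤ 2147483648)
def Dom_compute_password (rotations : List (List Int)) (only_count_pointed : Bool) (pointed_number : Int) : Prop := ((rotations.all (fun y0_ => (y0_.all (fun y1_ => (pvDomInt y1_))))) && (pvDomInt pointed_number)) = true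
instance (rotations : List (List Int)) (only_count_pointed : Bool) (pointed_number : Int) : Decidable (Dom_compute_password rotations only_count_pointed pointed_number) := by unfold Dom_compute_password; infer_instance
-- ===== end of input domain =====

-- B replaces A's per-rotation scan of all `n` click positions by counting one 100-step period
-- (the hit pattern of (p + a*i) % 100 repeats with period 100) — asymptotically fewer iterations.


-- ===== PORT A =====
def compute_password (rotations : List (List Int)) (only_count_pointed : Bool) (pointed_number : Int) : Int :=
  (rotations.foldl (fun st rotation =>
    let password :=
      if !only_count_pointed then
        st.1 + (((PySem.List.pyRange 1 (PySem.List.pyGetD rotation 1 0 + 1) 1).filter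
            (fun i => PySem.Int.mod (st.2 + PySem.List.pyGetD rotation 0 0 * i) 100 == 0)).map
            (fun _ => (1 : Int))).sum
      else st.1
    let p := PySem.Int.mod (st.2 + PySem.List.pyGetD rotation 0 0 * PySem.List.pyGetD rotation 1 0) 100
    let password := if only_count_pointed && p == 0 then password + 1 else password
    (password, p)) ((0 : Int), pointed_number)).1

-- ===== PORT B =====
def compute_password_alt (rotations : List (List Int)) (only_count_pointed : Bool) (pointed_number : Int) : Int :=
  (rotations.foldl (fun st rotation =>
    let a := PySem.List.pyGetD rotation 0 0
    let n := PySem.List.pyGetD rotation 1 0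
    let password :=
      if !only_count_pointed && decide (0 < n) then
        let q := PySem.Int.floordiv n 100
        let r := PySem.Int.mod n 100
        if q ≠ 0 then
          let fp := (PySem.List.pyRange 1 101 1).foldl (fun s i =>
            if PySem.Int.mod (st.2 + a * i) 100 == 0 then
              (s.1 + 1, if i ≤ r then s.2 + 1 else s.2)
            else s) ((0 : Int), (0 : Int))
          st.1 + (q * fp.1 + fp.2)
        else
          (PySem.List.pyRange 1 (r + 1) 1).foldl
            (fun c i => if PySem.Int.mod (st.2 + a * i) 100 == 0 then c + 1 else c) st.1
      else st.1
    let p := PySem.Int.mod (st.2 + a * n) 100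
    let password := if only_count_pointed && p == 0 then password + 1 else password
    (password, p)) ((0 : Int), pointed_number)).1

-- ===== PRECONDITION & SPEC =====
-- Pre_ excludes exactly the inputs where Python A raises IndexError: a rotation with fewer
-- than two entries (rotation[0]/rotation[1] out of range).
def Pre_compute_password (rotations : List (List Int)) (only_count_pointed : Bool) (pointed_number : Int) : Prop :=
  ∀ r ∈ rotations, 2 ≤ r.length
instance (rotations : List (List Int)) (only_count_pointed : Bool) (pointed_number : Int) : Decidable (Pre_compute_password rotations only_count_pointed pointed_number) := by unfold Pre_compute_password; infer_instance
def pvWitness_compute_password : List (List Int) × Bool × Int := ([[3, 250], [-7, 40]], false, 50)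

def Spec_compute_password (rotations : List (List Int)) (only_count_pointed : Bool) (pointed_number : Int) (out : Int) : Prop := out = compute_password_alt rotations only_count_pointed pointed_number
instance (rotations : List (List Int)) (only_count_pointed : Bool) (pointed_number : Int) (out : Int) : Decidable (Spec_compute_password rotations only_count_pointed pointed_number out) := by unfold Spec_compute_password; infer_instance

-- ===== CLAIM (what is proved, stated in full; the proofs are below) =====
def Claim_equal_compute_password : Prop := ∀ (rotations : List (List Int)) (only_count_pointed : Bool) (pointed_number : Int), Dom_compute_password rotations only_count_pointed pointed_number → Pre_compute_password rotations only_count_pointed pointed_number → Spec_compute_password rotations only_count_pointed pointed_number (compute_password rotations only_count_pointed pointed_number)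

-- ===== LEMMAS AND PROOFS =====

-- hit count of i in [1..hi] (proof-side abbreviation for the repeated counting loop)
def pvHits (p a hi : Int) : Int :=
  (PySem.List.pyRange 1 (hi + 1) 1).foldl
    (fun c i => if PySem.Int.mod (p + a * i) 100 == 0 then c + 1 else c) 0

-- the hit count over [1..N] in List.range form
def pvCountN (p a : Int) (N : Nat) : Int :=
  ((List.range N).countP (fun (k : Nat) => PySem.Int.mod (p + a * (1 + (k : Int))) 100 == 0) : Int)

lemma pvHits_eq_countP (p a hi : Int) :
    pvHits p a hi
      = ((PySem.List.pyRange 1 (hi + 1) 1).countP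
          (fun i => PySem.Int.mod (p + a * i) 100 == 0) : Int) := by
  unfold pvHits
  rw [PySem.List.foldl_if_add_one]
  ring

lemma pvHits_eq_countN (p a hi : Int) : pvHits p a hi = pvCountN p a hi.toNat := by
  unfold pvCountN
  rw [pvHits_eq_countP, PySem.List.pyRange_one, List.countP_map]
  simp only [Function.comp_def, add_sub_cancel_right]

lemma pvHits_nonpos (p a hi : Int) (h : hi ≤ 0) : pvHits p a hi = 0 := by
  unfold pvHits
  rw [PySem.List.pyRange_one_eq_nil (by omega)]
  rfl

lemma pvCond_period (p a x : Int) :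
    (PySem.Int.mod (p + a * (x + 100)) 100 == 0) = (PySem.Int.mod (p + a * x) 100 == 0) := by
  rw [PySem.Int.mod_eq_emod_of_pos (by norm_num), PySem.Int.mod_eq_emod_of_pos (by norm_num)]
  have h : p + a * (x + 100) = (p + a * x) + a * 100 := by ring
  rw [h, Int.add_mul_emod_self_right]

lemma pvCountN_step (p a : Int) (N : Nat) :
    pvCountN p a (100 + N) = pvCountN p a 100 + pvCountN p a N := by
  unfold pvCountN
  rw [List.range_add, List.countP_append]
  have hfun : ((fun (k : Nat) => PySem.Int.mod (p + a * (1 + (k : Int))) 100 == 0) ∘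
      (fun (x : Nat) => 100 + x))
      = (fun (k : Nat) => PySem.Int.mod (p + a * (1 + (k : Int))) 100 == 0) := by
    funext k
    simp only [Function.comp]
    have e : (1 : Int) + ((100 + k : Nat) : Int) = (1 + (k : Int)) + 100 := by push_cast; ring
    rw [e, pvCond_period]
  rw [List.countP_map, hfun]
  push_cast
  ring

lemma pvCountN_blocks (p a : Int) (k N : Nat) :
    pvCountN p a (100 * k + N) = (k : Int) * pvCountN p a 100 + pvCountN p a N := by
  induction k with
  | zero => simp
  | succ k ih =>
    have e : 100 * (k + 1) + N = 100 + (100 * k + N) := by omega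
    rw [e, pvCountN_step, ih]
    push_cast
    ring

lemma pvHits_split (p a n : Int) (hn : 0 < n) :
    pvHits p a n =
      PySem.Int.floordiv n 100 * pvHits p a 100 + pvHits p a (PySem.Int.mod n 100) := by
  have h100 : (0 : Int) < 100 := by norm_num
  rw [PySem.Int.floordiv_eq_ediv_of_pos h100, PySem.Int.mod_eq_emod_of_pos h100]
  have hq : 0 ≤ n / 100 := Int.ediv_nonneg (le_of_lt hn) (by norm_num)
  have hnn : n = 100 * (n / 100) + n % 100 := by omega
  rw [pvHits_eq_countN, pvHits_eq_countN, pvHits_eq_countN]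
  have htn : n.toNat = 100 * (n / 100).toNat + (n % 100).toNat := by omega
  rw [htn, pvCountN_blocks]
  have h1 : ((n / 100).toNat : Int) = n / 100 := Int.toNat_of_nonneg hq
  have h2 : ((100 : Int)).toNat = 100 := rfl
  rw [h1, h2]

-- A's inner generator-sum equals the counting loop
lemma pvSumA_eq_hits (p a n : Int) :
    (((PySem.List.pyRange 1 (n + 1) 1).filter
        (fun i => PySem.Int.mod (p + a * i) 100 == 0)).map (fun _ => (1 : Int))).sum
      = pvHits p a n := by
  rw [pvHits_eq_countP, PySem.List.sum_map_const_int, List.countP_eq_length_filter]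
  ring

-- B's paired full/part loop splits into two counting loops
lemma pvPairFold (c : Int → Bool) (r : Int) (l : List Int) :
    l.foldl (fun s i => if c i then (s.1 + 1, if i ≤ r then s.2 + 1 else s.2) else s)
        ((0 : Int), (0 : Int))
      = (l.foldl (fun s i => if c i then s + 1 else s) 0,
         l.foldl (fun s i => if c i && decide (i ≤ r) then s + 1 else s) 0) := by
  have h : l.foldl (fun s i => if c i then (s.1 + 1, if i ≤ r then s.2 + 1 else s.2) else s)
        ((0 : Int), (0 : Int))
      = l.foldl (fun s i => (if c i then s.1 + 1 else s.1,
          if c i && decide (i ≤ r) then s.2 + 1 else s.2)) ((0 : Int), (0 : Int)) := by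
    apply PySem.List.foldl_congr_mem
    intro acc i _
    by_cases hc : c i
    · by_cases hd : i ≤ r <;> simp [hc, hd]
    · simp [hc]
  rw [h, PySem.List.foldl_prod_mk (f := fun s i => if c i then s + 1 else s)
        (g := fun s i => if c i && decide (i ≤ r) then s + 1 else s)]

-- the 'part' count over a full block equals the count over [1..r]
lemma pvPart (p a r : Int) (h0 : 0 ≤ r) (h1 : r < 100) :
    (((PySem.List.pyRange 1 101 1).countP
        (fun i => PySem.Int.mod (p + a * i) 100 == 0 && decide (i ≤ r))) : Int)
      = pvHits p a r := by
  rw [pvHits_eq_countP]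
  rw [PySem.List.pyRange_one_append 1 (r + 1) 101 (by omega) (by omega), List.countP_append]
  have h2 : (PySem.List.pyRange (r + 1) 101 1).countP
      (fun i => PySem.Int.mod (p + a * i) 100 == 0 && decide (i ≤ r)) = 0 := by
    rw [List.countP_eq_zero]
    intro x hx
    have hm := (PySem.List.mem_pyRange_one).1 hx
    simp [show ¬(x ≤ r) by omega]
  have h3 : (PySem.List.pyRange 1 (r + 1) 1).countP
      (fun i => PySem.Int.mod (p + a * i) 100 == 0 && decide (i ≤ r))
      = (PySem.List.pyRange 1 (r + 1) 1).countP
          (fun i => PySem.Int.mod (p + a * i) 100 == 0) := by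
    apply List.countP_congr
    intro x hx
    have hm := (PySem.List.mem_pyRange_one).1 hx
    simp [show x ≤ r by omega]
  rw [h2, h3]
  simp

lemma pvStep_eq (only_count_pointed : Bool) (st : Int × Int) (rotation : List Int) :
    (let password :=
      if !only_count_pointed then
        st.1 + (((PySem.List.pyRange 1 (PySem.List.pyGetD rotation 1 0 + 1) 1).filter
            (fun i => PySem.Int.mod (st.2 + PySem.List.pyGetD rotation 0 0 * i) 100 == 0)).map
            (fun _ => (1 : Int))).sum
      else st.1
    let p := PySem.Int.mod (st.2 + PySem.List.pyGetD rotation 0 0 * PySem.List.pyGetD rotation 1 0) 100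
    let password := if only_count_pointed && p == 0 then password + 1 else password
    ((password, p) : Int × Int))
    =
    (let a := PySem.List.pyGetD rotation 0 0
     let n := PySem.List.pyGetD rotation 1 0
     let password :=
       if !only_count_pointed && decide (0 < n) then
         let q := PySem.Int.floordiv n 100
         let r := PySem.Int.mod n 100
         if q ≠ 0 then
           let fp := (PySem.List.pyRange 1 101 1).foldl (fun s i =>
             if PySem.Int.mod (st.2 + a * i) 100 == 0 then
               (s.1 + 1, if i ≤ r then s.2 + 1 else s.2)
             else s) ((0 : Int), (0 : Int))
           st.1 + (q * fp.1 + fp.2)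
         else
           (PySem.List.pyRange 1 (r + 1) 1).foldl
             (fun c i => if PySem.Int.mod (st.2 + a * i) 100 == 0 then c + 1 else c) st.1
       else st.1
     let p := PySem.Int.mod (st.2 + a * n) 100
     let password := if only_count_pointed && p == 0 then password + 1 else password
     ((password, p) : Int × Int)) := by
  simp only []
  set a := PySem.List.pyGetD rotation 0 0 with ha
  set n := PySem.List.pyGetD rotation 1 0 with hn'
  rw [pvSumA_eq_hits]
  by_cases hocp : only_count_pointed
  · simp [hocp]
  · simp only [hocp, Bool.not_false, Bool.true_and, if_true]
    by_cases hn : 0 < n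
    · have h100 : (0 : Int) < 100 := by norm_num
      have hr0 : 0 ≤ PySem.Int.mod n 100 := PySem.Int.mod_nonneg n h100
      have hr1 : PySem.Int.mod n 100 < 100 := PySem.Int.mod_lt n h100
      simp only [hn, decide_true, if_true]
      by_cases hq : PySem.Int.floordiv n 100 = 0
      · -- remainder-only branch: n < 100, so n % 100 = n
        have hrn : PySem.Int.mod n 100 = n := by
          rw [PySem.Int.mod_eq_emod_of_pos h100]
          rw [PySem.Int.floordiv_eq_ediv_of_pos h100] at hq
          omega
        simp only [hq, ne_eq, not_true_eq_false, if_false]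
        rw [PySem.List.foldl_if_add_one, hrn, ← pvHits_eq_countP]
      · simp only [ne_eq, hq, not_false_eq_true, if_true]
        rw [pvPairFold, pvHits_split st.2 a n hn]
        rw [PySem.List.foldl_if_add_one, PySem.List.foldl_if_add_one]
        have hfull : ((PySem.List.pyRange 1 101 1).countP
            (fun i => PySem.Int.mod (st.2 + a * i) 100 == 0) : Int) = pvHits st.2 a 100 := by
          rw [pvHits_eq_countP]
          norm_num
        rw [pvPart st.2 a (PySem.Int.mod n 100) hr0 hr1] at *
        simp only [zero_add]
        rw [hfull]
    · have hz : pvHits st.2 a n = 0 := pvHits_nonpos st.2 a n (by omega)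
      simp [hn, hz]

theorem pv_eq (rotations : List (List Int)) (only_count_pointed : Bool) (pointed_number : Int) :
    compute_password rotations only_count_pointed pointed_number
      = compute_password_alt rotations only_count_pointed pointed_number := by
  unfold compute_password compute_password_alt
  congr 1
  apply PySem.List.foldl_congr_mem
  intro st rotation _
  exact pvStep_eq only_count_pointed st rotation

-- ===== VERDICT (by name: the statement is the Claim_ definition above) =====
theorem compute_password_spec : Claim_equal_compute_password := by
  intro rotations only_count_pointed pointed_number _ _
  unfold Spec_compute_password
  exact pv_eq rotations only_count_pointed pointed_number
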